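-- pv_equiv track=rewrite | github.com/Automotive-Intelligence/paperclip | scripts/salvage_marcus_scrapes.py | parse_marcus_description
-- ===== SOURCE A (Python) =====
-- def parse_marcus_description(desc: str) -> dict:
--     """Marcus's description format:
--     'Company: <name> | marcus prospecting: <reason> | Phone: ... | Website: ...'
--     Returns dict with company, reason, phone, website.
--     """
--     out = {"company": "", "reason": "", "phone": "", "website": ""}
--     if not desc:
--         return out
--     parts = [p.strip() for p in desc.split("|")]
--     for p in parts:
--         if p.lower().startswith("company:"):
--             out["company"] = p[8:].strip()
--         elif p.lower().startswith("marcus prospecting:"):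
--             out["reason"] = p[19:].strip()
--         elif p.lower().startswith("phone:"):
--             out["phone"] = p[6:].strip()
--         elif p.lower().startswith("website:"):
--             out["website"] = p[8:].strip()
--     return out
-- ===== SOURCE B (Python) =====
-- _FIELDS = {"company": "company", "marcus prospecting": "reason",
--            "phone": "phone", "website": "website"}
--
-- def parse_marcus_description(desc: str) -> dict:
--     out = {"company": "", "reason": "", "phone": "", "website": ""}
--     if not desc:
--         return out
--     for part in desc.split("|"):
--         key, sep, value = part.strip().partition(":")
--         field = _FIELDS.get(key.lower())
--         if sep and field is not None:
--             out[field] = value.strip()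
--     return out
-- ===== Notes on version B (the rewrite author's own statement) =====
-- stated objective: simpler
-- what changed: Replaces A's if/elif chain of four case-insensitive prefix tests with hard-coded slice offsets by partitioning each part at its first colon and dispatching the lowercased key through a fixed key-to-field dictionary.
import Mathlib
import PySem

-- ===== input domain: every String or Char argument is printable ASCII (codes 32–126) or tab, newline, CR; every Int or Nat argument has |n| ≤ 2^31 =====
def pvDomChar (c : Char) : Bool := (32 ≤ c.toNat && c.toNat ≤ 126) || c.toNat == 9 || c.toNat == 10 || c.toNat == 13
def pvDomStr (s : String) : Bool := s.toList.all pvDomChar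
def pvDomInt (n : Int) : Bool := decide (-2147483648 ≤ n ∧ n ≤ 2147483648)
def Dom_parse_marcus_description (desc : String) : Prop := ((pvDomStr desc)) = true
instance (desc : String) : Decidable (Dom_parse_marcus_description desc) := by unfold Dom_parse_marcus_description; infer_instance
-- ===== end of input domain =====

-- B replaces A's if/elif chain of case-insensitive prefix tests with fixed slice offsets by a
-- partition-at-first-colon plus a fixed key→field dictionary dispatch (objective: simpler).

-- ===== PORT A =====
def parse_marcus_description (desc : String) : List (String × String) :=
  let out : PySem.Dict String String :=
    PySem.Dict.ofList [("company", ""), ("reason", ""), ("phone", ""), ("website", "")]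
  if desc.toList = [] then out.items else
  let parts := (PySem.Chars.splitOn desc.toList ['|']).map PySem.Chars.strip
  (parts.foldl (fun d p =>
    if PySem.Chars.startswith (PySem.Chars.lower p) "company:".toList then
      d.insert "company" (String.ofList (PySem.Chars.strip (PySem.Chars.slice p (some 8) none)))
    else if PySem.Chars.startswith (PySem.Chars.lower p) "marcus prospecting:".toList then
      d.insert "reason" (String.ofList (PySem.Chars.strip (PySem.Chars.slice p (some 19) none)))
    else if PySem.Chars.startswith (PySem.Chars.lower p) "phone:".toList then
      d.insert "phone" (String.ofList (PySem.Chars.strip (PySem.Chars.slice p (some 6) none)))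
    else if PySem.Chars.startswith (PySem.Chars.lower p) "website:".toList then
      d.insert "website" (String.ofList (PySem.Chars.strip (PySem.Chars.slice p (some 8) none)))
    else d) out).items

-- ===== PORT B =====
-- module-level _FIELDS of Source B
def pvFieldsB : PySem.Dict String String :=
  PySem.Dict.ofList
    [("company", "company"), ("marcus prospecting", "reason"),
     ("phone", "phone"), ("website", "website")]

-- hand port of str.partition(":") (PySem has no partition): exact — splits at the FIRST ':',
-- returning (before, ":", after); if there is no ':', returns (s, "", "").
def pvPartitionColon : List Char → List Char × List Char × List Char
  | [] => ([], [], [])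
  | c :: cs =>
    if c = ':' then ([], [':'], cs)
    else
      let r := pvPartitionColon cs
      (c :: r.1, r.2.1, r.2.2)

def parse_marcus_description_alt (desc : String) : List (String × String) :=
  let out : PySem.Dict String String :=
    PySem.Dict.ofList [("company", ""), ("reason", ""), ("phone", ""), ("website", "")]
  if desc.toList = [] then out.items else
  ((PySem.Chars.splitOn desc.toList ['|']).foldl (fun d part =>
    let r := pvPartitionColon (PySem.Chars.strip part)
    match r.2.1, pvFieldsB.get? (String.ofList (PySem.Chars.lower r.1)) with
    | _ :: _, some f => d.insert f (String.ofList (PySem.Chars.strip r.2.2))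
    | _, _ => d) out).items

-- ===== PRECONDITION & SPEC =====
def Spec_parse_marcus_description (desc : String) (out : List (String × String)) : Prop := out = parse_marcus_description_alt desc
instance (desc : String) (out : List (String × String)) : Decidable (Spec_parse_marcus_description desc out) := by unfold Spec_parse_marcus_description; infer_instance

-- ===== CLAIM (what is proved, stated in full; the proofs are below) =====
def Claim_equal_parse_marcus_description : Prop := ∀ (desc : String), Dom_parse_marcus_description desc → Spec_parse_marcus_description desc (parse_marcus_description desc)

-- ===== LEMMAS AND PROOFS =====

theorem pv_lowerChar_ne_colon (c : Char) (h : ¬ c = ':') : ¬ PySem.Chars.lowerChar c = ':' := by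
  unfold PySem.Chars.lowerChar
  split
  · rename_i hu
    unfold PySem.Chars.isupper at hu
    simp [Char.le_def, UInt32.le_iff_toNat_le] at hu
    intro heq
    have h2 : (Char.ofNat (c.toNat + 32)).toNat = (':' : Char).toNat := by rw [heq]
    have hv : (c.toNat + 32).isValidChar := by left; omega
    rw [Char.toNat_ofNat, if_pos hv] at h2
    have h58 : (':' : Char).toNat = 58 := by decide
    omega
  · exact h

theorem pv_colon_not_mem_lower (k : List Char) (hk : ':' ∉ k) : ':' ∉ PySem.Chars.lower k := by
  unfold PySem.Chars.lower
  intro hmem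
  rcases List.mem_map.mp hmem with ⟨c, hc, heq⟩
  exact pv_lowerChar_ne_colon c (fun h => hk (h ▸ hc)) heq

theorem pv_lower_append (k v : List Char) :
    PySem.Chars.lower (k ++ ':' :: v) = PySem.Chars.lower k ++ ':' :: PySem.Chars.lower v := by
  unfold PySem.Chars.lower
  simp only [List.map_append, List.map_cons]
  norm_num [show PySem.Chars.lowerChar ':' = ':' from by decide]

theorem pv_prefix_colon_iff (w a b : List Char) (hw : ':' ∉ w) (ha : ':' ∉ a) :
    (w ++ [':']) <+: (a ++ ':' :: b) ↔ w = a := by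
  induction w generalizing a with
  | nil =>
    cases a with
    | nil => simp
    | cons x xs =>
      simp only [List.nil_append, List.cons_append, List.cons_prefix_cons]
      constructor
      · rintro ⟨h1, _⟩; exact absurd (h1 ▸ List.mem_cons_self) ha
      · intro h; cases h
  | cons c w ih =>
    cases a with
    | nil =>
      simp only [List.cons_append, List.nil_append, List.cons_prefix_cons]
      constructor
      · rintro ⟨h1, _⟩; exact absurd (h1 ▸ List.mem_cons_self) hw
      · intro h; cases h
    | cons x xs =>
      simp only [List.cons_append, List.cons_prefix_cons]
      have hw' : ':' ∉ w := fun h => hw (List.mem_cons_of_mem _ h)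
      have ha' : ':' ∉ xs := fun h => ha (List.mem_cons_of_mem _ h)
      rw [ih xs hw' ha']
      constructor
      · rintro ⟨h1, h2⟩; rw [h1, h2]
      · intro h; cases h; exact ⟨rfl, rfl⟩

theorem pv_sw_false (q w : List Char) (hq : ':' ∉ q) :
    PySem.Chars.startswith q (w ++ [':']) = false := by
  unfold PySem.Chars.startswith
  rw [Bool.eq_false_iff]
  intro h
  have hpre : (w ++ [':']) <+: q := List.isPrefixOf_iff_prefix.mp h
  exact hq (hpre.subset (by simp))

theorem pv_sw_decomp (a b w : List Char) (hw : ':' ∉ w) (ha : ':' ∉ a) :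
    PySem.Chars.startswith (a ++ ':' :: b) (w ++ [':']) = decide (a = w) := by
  unfold PySem.Chars.startswith
  by_cases h : a = w
  · subst h
    rw [decide_eq_true rfl, List.isPrefixOf_iff_prefix]
    exact ⟨b, by simp⟩
  · rw [decide_eq_false h, Bool.eq_false_iff]
    intro hp
    exact h ((pv_prefix_colon_iff w a b hw ha).mp (List.isPrefixOf_iff_prefix.mp hp)).symm

theorem pv_partition_spec (q : List Char) :
    (':' ∉ q ∧ pvPartitionColon q = (q, [], [])) ∨
    ∃ k v, q = k ++ ':' :: v ∧ ':' ∉ k ∧ pvPartitionColon q = (k, [':'], v) := by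
  induction q with
  | nil => left; simp [pvPartitionColon]
  | cons c cs ih =>
    by_cases hc : c = ':'
    · right; exact ⟨[], cs, by simp [hc], by simp, by simp [pvPartitionColon, hc]⟩
    · rcases ih with ⟨h1, h2⟩ | ⟨k, v, hq, hk, hp⟩
      · left
        refine ⟨by simp [hc, h1, List.mem_cons, Ne.symm], ?_⟩
        simp [pvPartitionColon, hc, h2]
      · right
        refine ⟨c :: k, v, by simp [hq], by simp [List.mem_cons, hc, hk, Ne.symm], ?_⟩
        simp [pvPartitionColon, hc, hp]

theorem pv_ofList_eq (l : List Char) (s : String) : String.ofList l = s ↔ l = s.toList := by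
  constructor
  · intro h; have := congrArg String.toList h; simpa using this
  · intro h; subst h; simp

theorem pv_fields_get? (s : String) :
    pvFieldsB.get? s =
      if s = "company" then some "company"
      else if s = "marcus prospecting" then some "reason"
      else if s = "phone" then some "phone"
      else if s = "website" then some "website"
      else none := by
  have h : pvFieldsB = PySem.Dict.mk
      [("company", "company"), ("marcus prospecting", "reason"),
       ("phone", "phone"), ("website", "website")] := by decide
  rw [h]
  rw [PySem.Dict.get?_mk_cons, PySem.Dict.get?_mk_cons, PySem.Dict.get?_mk_cons,
    PySem.Dict.get?_mk_cons]
  simp only [beq_iff_eq]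
  by_cases h1 : s = "company" <;> by_cases h2 : s = "marcus prospecting" <;>
    by_cases h3 : s = "phone" <;> by_cases h4 : s = "website" <;>
    simp_all [eq_comm, PySem.Dict.get?]

theorem pv_core (d : PySem.Dict String String) (q : List Char) :
    (let r := pvPartitionColon q
     match r.2.1, pvFieldsB.get? (String.ofList (PySem.Chars.lower r.1)) with
     | _ :: _, some f => d.insert f (String.ofList (PySem.Chars.strip r.2.2))
     | _, _ => d)
    =
    (if PySem.Chars.startswith (PySem.Chars.lower q) "company:".toList then
      d.insert "company" (String.ofList (PySem.Chars.strip (PySem.Chars.slice q (some 8) none)))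
    else if PySem.Chars.startswith (PySem.Chars.lower q) "marcus prospecting:".toList then
      d.insert "reason" (String.ofList (PySem.Chars.strip (PySem.Chars.slice q (some 19) none)))
    else if PySem.Chars.startswith (PySem.Chars.lower q) "phone:".toList then
      d.insert "phone" (String.ofList (PySem.Chars.strip (PySem.Chars.slice q (some 6) none)))
    else if PySem.Chars.startswith (PySem.Chars.lower q) "website:".toList then
      d.insert "website" (String.ofList (PySem.Chars.strip (PySem.Chars.slice q (some 8) none)))
    else d) := by
  have e1 : "company:".toList = "company".toList ++ [':'] := by decide
  have e2 : "marcus prospecting:".toList = "marcus prospecting".toList ++ [':'] := by decide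
  have e3 : "phone:".toList = "phone".toList ++ [':'] := by decide
  have e4 : "website:".toList = "website".toList ++ [':'] := by decide
  rcases pv_partition_spec q with ⟨hq, hp⟩ | ⟨k, v, hqkv, hk, hp⟩
  · rw [hp]
    have hlq := pv_colon_not_mem_lower q hq
    rw [e1, e2, e3, e4]
    rw [pv_sw_false _ "company".toList hlq, pv_sw_false _ "marcus prospecting".toList hlq,
      pv_sw_false _ "phone".toList hlq, pv_sw_false _ "website".toList hlq]
    simp
  · subst hqkv
    rw [hp]
    dsimp only
    rw [pv_lower_append, e1, e2, e3, e4]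
    have hlk := pv_colon_not_mem_lower k hk
    rw [pv_sw_decomp _ _ _ (by decide) hlk, pv_sw_decomp _ _ _ (by decide) hlk,
      pv_sw_decomp _ _ _ (by decide) hlk, pv_sw_decomp _ _ _ (by decide) hlk]
    rw [pv_fields_get?]
    simp only [PySem.Chars.slice_eq_listSlice, decide_eq_true_eq, pv_ofList_eq]
    have hdropn : ∀ n : Int, n.toNat = k.length + 1 →
        PySem.List.slice (k ++ ':' :: v) (some n) none = v := by
      intro n hn
      have hn0 : 0 ≤ n := by omega
      rw [PySem.List.slice_from _ hn0, hn, List.drop_append]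
      simp
    by_cases h1 : PySem.Chars.lower k = "company".toList
    · have hlen : k.length = 7 := by
        have := congrArg List.length h1
        simpa [PySem.Chars.lower] using this
      rw [if_pos h1, hdropn 8 (by omega)]
      rw [if_pos h1]
    · rw [if_neg h1]
      rw [if_neg h1]
      by_cases h2 : PySem.Chars.lower k = "marcus prospecting".toList
      · have hlen : k.length = 18 := by
          have := congrArg List.length h2
          simpa [PySem.Chars.lower] using this
        rw [if_pos h2, hdropn 19 (by omega)]
        rw [if_pos h2]
      · rw [if_neg h2]
        rw [if_neg h2]
        by_cases h3 : PySem.Chars.lower k = "phone".toList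
        · have hlen : k.length = 5 := by
            have := congrArg List.length h3
            simpa [PySem.Chars.lower] using this
          rw [if_pos h3, hdropn 6 (by omega)]
          rw [if_pos h3]
        · rw [if_neg h3]
          rw [if_neg h3]
          by_cases h4 : PySem.Chars.lower k = "website".toList
          · have hlen : k.length = 7 := by
              have := congrArg List.length h4
              simpa [PySem.Chars.lower] using this
            rw [if_pos h4, hdropn 8 (by omega)]
            rw [if_pos h4]
          · rw [if_neg h4]
            rw [if_neg h4]

-- ===== VERDICT (by name: the statement is the Claim_ definition above) =====
theorem parse_marcus_description_spec : Claim_equal_parse_marcus_description := by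
  intro desc _
  unfold Spec_parse_marcus_description parse_marcus_description parse_marcus_description_alt
  by_cases h : desc.toList = []
  · simp [h]
  · simp only [h, if_false]
    rw [List.foldl_map]
    refine congrArg PySem.Dict.items ?_
    refine List.foldl_ext _ _ _ (fun d p _ => ?_)
    exact (pv_core d (PySem.Chars.strip p)).symm
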